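-- pv_equiv track=rewrite | github.com/mirkomantovani/Formal-Methods-Concurrent-Real-Time | zot/clean-history.py | split_time_instants
-- ===== SOURCE A (Python) =====
-- def split_time_instants(lines):
--     result = []
--     instant = []
--     for line in lines:
--         if "-----" in line:
--             result.append(instant)
--             instant = []
--         instant.append(line)
--     return result
-- ===== SOURCE B (Python) =====
-- def split_time_instants(lines):
--     lines = list(lines)
--     idxs = [i for i, l in enumerate(lines) if "-----" in l]
--     result = []
--     prev = 0
--     for idx in idxs:
--         result.append(lines[prev:idx])
--         prev = idx
--     return result
-- ===== Notes on version B (the rewrite author's own statement) =====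
-- stated objective: alternative
-- what changed: B first collects the delimiter indices in one scan and then emits each group as a slice lines[prev:idx], instead of A's single pass that mutates a running group accumulator; the dropped trailing group and delimiter-starts-next-group behaviour fall out of the slice bounds.
import Mathlib
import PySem

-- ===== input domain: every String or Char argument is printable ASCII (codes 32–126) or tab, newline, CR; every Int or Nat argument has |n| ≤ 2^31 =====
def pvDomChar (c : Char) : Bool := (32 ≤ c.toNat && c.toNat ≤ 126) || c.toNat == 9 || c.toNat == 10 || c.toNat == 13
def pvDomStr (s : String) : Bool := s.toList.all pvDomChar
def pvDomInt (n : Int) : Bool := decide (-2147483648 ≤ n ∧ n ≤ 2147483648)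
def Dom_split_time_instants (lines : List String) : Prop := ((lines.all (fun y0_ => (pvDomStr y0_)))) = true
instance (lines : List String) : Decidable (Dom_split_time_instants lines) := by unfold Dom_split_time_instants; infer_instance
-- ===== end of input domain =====

-- B builds the result from delimiter indices and slices instead of A's running group accumulator (alternative decomposition, same cost).

-- ===== PORT A =====
def split_time_instants (lines : List String) : List (List String) :=
  (lines.foldl
    (fun (st : List (List String) × List String) line =>
      let st := if PySem.Str.isIn "-----" line then (st.1 ++ [st.2], ([] : List String)) else st
      (st.1, st.2 ++ [line]))
    ([], [])).1

-- ===== PORT B =====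
def split_time_instants_alt (lines : List String) : List (List String) :=
  let idxs := ((PySem.List.enumerate lines).filter (fun p => PySem.Str.isIn "-----" p.2)).map (·.1)
  (idxs.foldl
    (fun (st : List (List String) × Int) idx =>
      (st.1 ++ [PySem.List.slice lines (some st.2) (some idx)], idx))
    ([], 0)).1

-- ===== PRECONDITION & SPEC =====
def Spec_split_time_instants (lines : List String) (out : List (List String)) : Prop := out = split_time_instants_alt lines
instance (lines : List String) (out : List (List String)) : Decidable (Spec_split_time_instants lines out) := by unfold Spec_split_time_instants; infer_instance

-- ===== CLAIM (what is proved, stated in full; the proofs are below) =====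
def Claim_equal_split_time_instants : Prop := ∀ (lines : List String), Dom_split_time_instants lines → Spec_split_time_instants lines (split_time_instants lines)

-- ===== LEMMAS AND PROOFS =====

-- A's loop body
def pvFA (st : List (List String) × List String) (line : String) : List (List String) × List String :=
  let st := if PySem.Str.isIn "-----" line then (st.1 ++ [st.2], ([] : List String)) else st
  (st.1, st.2 ++ [line])

-- B's delimiter-index list and loop body over an arbitrary list to slice
def pvIdxs (xs : List String) : List Int :=
  ((PySem.List.enumerate xs).filter (fun p => PySem.Str.isIn "-----" p.2)).map (·.1)

def pvGB (L : List String) (st : List (List String) × Int) (idx : Int) : List (List String) × Int :=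
  (st.1 ++ [PySem.List.slice L (some st.2) (some idx)], idx)

lemma split_eq_fa (lines : List String) :
    split_time_instants lines = (lines.foldl pvFA ([], [])).1 := rfl

lemma split_alt_eq_gb (lines : List String) :
    split_time_instants_alt lines = ((pvIdxs lines).foldl (pvGB lines) ([], 0)).1 := rfl

lemma mem_pvIdxs {xs : List String} {i : Int} (h : i ∈ pvIdxs xs) :
    ∃ k : Nat, i = (k : Int) ∧ k < xs.length := by
  unfold pvIdxs at h
  simp only [List.mem_map, List.mem_filter] at h
  obtain ⟨p, ⟨hp, _⟩, hpi⟩ := h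
  rw [PySem.List.mem_enumerate_iff] at hp
  obtain ⟨k, hk, rfl⟩ := hp
  exact ⟨k, by simpa using hpi.symm, hk⟩

lemma pvIdxs_append (xs : List String) (x : String) :
    pvIdxs (xs ++ [x]) =
      pvIdxs xs ++ (if PySem.Str.isIn "-----" x then [((xs.length : Int))] else []) := by
  unfold pvIdxs
  rw [PySem.List.enumerate_append]
  simp [PySem.List.enumerate_cons, PySem.List.enumerate_nil, List.filter_append]
  split <;> simp_all

lemma slice_append_of_le {L M : List String} {a : Nat} {b : Nat} (hb : b ≤ L.length) :
    PySem.List.slice (L ++ M) (some (a : Int)) (some (b : Int)) =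
      PySem.List.slice L (some (a : Int)) (some (b : Int)) := by
  rw [PySem.List.slice_natCast, PySem.List.slice_natCast]
  by_cases hab : a ≤ b
  · rw [List.drop_append_of_le_length (by omega)]
    rw [List.take_append_of_le_length (by simp; omega)]
  · have : b - a = 0 := by omega
    simp [this]

lemma fold_gb_ext (M : List String) (is : List Int) :
    ∀ (L : List String) (r : List (List String)) (p : Nat),
      (∀ i ∈ is, ∃ k : Nat, i = (k : Int) ∧ k ≤ L.length) →
      is.foldl (pvGB (L ++ M)) (r, (p : Int)) = is.foldl (pvGB L) (r, (p : Int)) := by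
  induction is with
  | nil => intro L r p _; rfl
  | cons i is ih =>
    intro L r p h
    obtain ⟨k, rfl, hk⟩ := h i (List.mem_cons_self ..)
    simp only [List.foldl_cons, pvGB]
    rw [slice_append_of_le hk]
    exact ih L _ k (fun j hj => h j (List.mem_cons_of_mem _ hj))

lemma main_invariant (lines : List String) :
    ∃ p : Nat, p ≤ lines.length ∧
      (pvIdxs lines).foldl (pvGB lines) ([], 0) = ((lines.foldl pvFA ([], [])).1, (p : Int)) ∧
      (lines.foldl pvFA ([], [])).2 = lines.drop p := by
  induction lines using List.reverseRecOn with
  | nil => exact ⟨0, by simp [pvIdxs, PySem.List.enumerate_nil]⟩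
  | append_singleton xs x ih =>
    obtain ⟨p, hp, hB, hA2⟩ := ih
    have hbound : ∀ i ∈ pvIdxs xs, ∃ k : Nat, i = (k : Int) ∧ k ≤ xs.length := by
      intro i hi; obtain ⟨k, rfl, hk⟩ := mem_pvIdxs hi; exact ⟨k, rfl, Nat.le_of_lt hk⟩
    have hext : (pvIdxs xs).foldl (pvGB (xs ++ [x])) ([], 0) =
        (pvIdxs xs).foldl (pvGB xs) ([], 0) := by
      have := fold_gb_ext [x] (pvIdxs xs) xs [] 0 hbound
      simpa using this
    rw [List.foldl_append, pvIdxs_append]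
    by_cases hd : PySem.Chars.isIn ['-', '-', '-', '-', '-'] x.toList = true
    · have hds : PySem.Str.isIn "-----" x = true := by simpa [PySem.Str.isIn] using hd
      refine ⟨xs.length, by simp, ?_, ?_⟩
      · rw [if_pos hds, List.foldl_append, hext, hB]
        simp only [List.foldl_cons, List.foldl_nil, pvGB, pvFA]
        rw [slice_append_of_le (le_refl _), PySem.List.slice_natCast, hA2]
        have h2 : (xs.drop p).take (xs.length - p) = xs.drop p := by
          apply List.take_of_length_le; simp
        simp [h2, hd]
      · simp [pvFA, hd]
    · have hds : PySem.Str.isIn "-----" x = false := by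
        simpa [PySem.Str.isIn] using hd
      simp only [Bool.not_eq_true] at hd
      refine ⟨p, by simpa using Nat.le_succ_of_le hp, ?_, ?_⟩
      · simp only [hds, Bool.false_eq_true, if_false, List.append_nil]
        rw [hext, hB]
        simp [pvFA, hd]
      · simp [pvFA, hd]
        rw [hA2, List.drop_append_of_le_length hp]

-- ===== VERDICT (by name: the statement is the Claim_ definition above) =====
theorem split_time_instants_spec : Claim_equal_split_time_instants := by
  intro lines _
  unfold Spec_split_time_instants
  rw [split_eq_fa, split_alt_eq_gb]
  obtain ⟨p, _, hB, _⟩ := main_invariant lines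
  rw [hB]
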